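-- pv_equiv track=rewrite | github.com/hdalton13/cos120 | LABS/LAB07/num_lab7.py | homonyms
-- ===== SOURCE A (Python) =====
-- def homonyms(lst):
--     new={}
--     for i in lst:
--         for k in i:
--             idx= i.index(k)
--             copy=i[:]
--             copy.pop(idx)
--             new[k]=copy
--     return new
-- ===== SOURCE B (Python) =====
-- def homonyms(lst):
--     # keys in first-occurrence order over the flattened input
--     order = []
--     for i in lst:
--         for k in i:
--             if k not in order:
--                 order.append(k)
--     # for each key, scan the input backwards for the last list containing it
--     # and drop that list's first occurrence of the key
--     out = {}
--     for k in order: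
--         for i in reversed(lst):
--             if k in i:
--                 c = i[:]
--                 c.remove(k)
--                 out[k] = c
--                 break
--     return out
-- ===== Notes on version B (the rewrite author's own statement) =====
-- stated objective: alternative
-- what changed: B builds no dict while scanning: it first collects the keys in first-occurrence order, then answers each key independently by a backward scan of the input for the last list containing it, removing that list's first occurrence of the key; A instead maintains a dict with copy-index-pop at every element visit.
import Mathlib
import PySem

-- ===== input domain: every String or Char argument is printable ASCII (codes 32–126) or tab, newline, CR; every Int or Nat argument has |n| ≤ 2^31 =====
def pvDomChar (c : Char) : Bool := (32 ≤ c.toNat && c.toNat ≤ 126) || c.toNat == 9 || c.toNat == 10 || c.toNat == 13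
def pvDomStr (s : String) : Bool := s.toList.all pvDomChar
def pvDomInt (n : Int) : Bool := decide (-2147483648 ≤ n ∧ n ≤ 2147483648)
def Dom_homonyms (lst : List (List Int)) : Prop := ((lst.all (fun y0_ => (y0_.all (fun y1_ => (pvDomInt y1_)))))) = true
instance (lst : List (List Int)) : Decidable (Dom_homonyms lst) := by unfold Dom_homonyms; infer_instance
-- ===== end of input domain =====

-- B replaces A's dict-building nested loop by a characterization: collect the keys in
-- first-occurrence order, then for each key scan the input BACKWARDS for the last list
-- containing it and drop that list's first occurrence of the key; an alternative
-- decomposition, same result.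

-- ===== PORT A =====
def homonyms (lst : List (List Int)) : List (Int × List Int) :=
  (lst.foldl (fun new i =>
    i.foldl (fun new k =>
      match PySem.List.index? i k with          -- idx = i.index(k)
      | some idx =>
        match PySem.List.pop? i (idx : Int) with  -- copy = i[:]; copy.pop(idx)
        | some r => PySem.Dict.insert new k r.2   -- new[k] = copy
        | none => new                             -- unreachable: idx is a valid index
      | none => new                               -- unreachable: k ∈ i
    ) new) PySem.Dict.empty).items

-- ===== PORT B =====
def homonyms_alt (lst : List (List Int)) : List (Int × List Int) :=
  -- pass 1: keys in first-occurrence order ('if k not in order: order.append(k)')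
  let order : List Int :=
    lst.foldl (fun ord i =>
      i.foldl (fun ord k => if ord.contains k then ord else ord ++ [k]) ord) []
  -- pass 2: for each key, first hit of the backward scan ('for i in reversed(lst): … break'
  -- is List.find? over lst.reverse), then 'c = i[:]; c.remove(k)'
  (order.foldl (fun out k =>
    match (lst.reverse).find? (fun i => i.contains k) with
    | some i =>
      match PySem.List.remove? i k with
      | some c => PySem.Dict.insert out k c
      | none => out                               -- unreachable: k ∈ i
    | none => out                                 -- unreachable: k came from some list
  ) PySem.Dict.empty).items

-- ===== PRECONDITION & SPEC =====
def Spec_homonyms (lst : List (List Int)) (out : List (Int × List Int)) : Prop := out = homonyms_alt lst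
instance (lst : List (List Int)) (out : List (Int × List Int)) : Decidable (Spec_homonyms lst out) := by unfold Spec_homonyms; infer_instance

-- ===== CLAIM (what is proved, stated in full; the proofs are below) =====
def Claim_equal_homonyms : Prop := ∀ (lst : List (List Int)), Dom_homonyms lst → Spec_homonyms lst (homonyms lst)

-- ===== LEMMAS AND PROOFS =====

-- the value both programs store for key k found in list i: i with its first occurrence of k removed
def pvEra (k : Int) (i : List Int) : List Int :=
  match PySem.List.index? i k with
  | some idx => i.eraseIdx idx
  | none => i

def pvG (p : Int × List Int) : Int × List Int := (p.1, pvEra p.1 p.2)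

def pvDmap (d : PySem.Dict Int (List Int)) : PySem.Dict Int (List Int) :=
  PySem.Dict.mk (d.items.map pvG)

-- the dict A builds, with every value replaced by its source list
def pvLast (lst : List (List Int)) : PySem.Dict Int (List Int) :=
  lst.foldl (fun d i => i.foldl (fun d k => PySem.Dict.insert d k i) d) PySem.Dict.empty

theorem pvDmap_contains (d : PySem.Dict Int (List Int)) (k : Int) :
    (pvDmap d).contains k = d.contains k := by
  simp [pvDmap, PySem.Dict.contains, List.any_map, Function.comp_def, pvG]

theorem pvDmap_insert (d : PySem.Dict Int (List Int)) (k : Int) (v : List Int) :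
    pvDmap (d.insert k v) = (pvDmap d).insert k (pvEra k v) := by
  apply PySem.Dict.ext
  by_cases h : d.contains k = true
  · have h' : (pvDmap d).contains k = true := (pvDmap_contains d k).trans h
    rw [PySem.Dict.items_insert_of_contains _ _ h']
    show ((d.insert k v).items).map pvG = _
    rw [PySem.Dict.items_insert_of_contains _ _ h]
    show _ = ((d.items.map pvG).map _)
    rw [List.map_map, List.map_map]
    apply List.map_congr_left
    intro p _
    by_cases hk : (p.1 == k) = true <;> simp [hk, pvG, Function.comp]
  · have h' : (pvDmap d).contains k = false :=
      (pvDmap_contains d k).trans (Bool.of_not_eq_true h)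
    rw [PySem.Dict.items_insert_of_not_contains _ _ h']
    show ((d.insert k v).items).map pvG = _
    rw [PySem.Dict.items_insert_of_not_contains _ _ (Bool.of_not_eq_true h)]
    simp [pvG, pvDmap]

-- A's inner step, for k ∈ i, inserts pvEra k i
theorem pvA_step (i : List Int) (k : Int) (hk : k ∈ i) (new : PySem.Dict Int (List Int)) :
    (match PySem.List.index? i k with
     | some idx =>
       match PySem.List.pop? i (idx : Int) with
       | some r => PySem.Dict.insert new k r.2
       | none => new
     | none => new) = new.insert k (pvEra k i) := by
  obtain ⟨idx, hidx⟩ :=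
    Option.isSome_iff_exists.mp ((PySem.List.index?_isSome_iff i k).mpr hk)
  obtain ⟨hlt, -, -⟩ := PySem.List.getElem_of_index?_eq_some hidx
  simp only [hidx, PySem.List.pop?_natCast i idx hlt, pvEra]

-- A's inner fold over one list i = pvDmap of the same fold inserting i itself
theorem pvInner (i : List Int) (l : List Int) (hl : ∀ k ∈ l, k ∈ i)
    (d : PySem.Dict Int (List Int)) :
    l.foldl (fun new k =>
      match PySem.List.index? i k with
      | some idx =>
        match PySem.List.pop? i (idx : Int) with
        | some r => PySem.Dict.insert new k r.2
        | none => new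
      | none => new) (pvDmap d)
    = pvDmap (l.foldl (fun d k => PySem.Dict.insert d k i) d) := by
  induction l generalizing d with
  | nil => rfl
  | cons x t ih =>
    simp only [List.foldl_cons]
    rw [pvA_step i x (hl x List.mem_cons_self), ← pvDmap_insert]
    exact ih (fun k hk => hl k (List.mem_cons_of_mem _ hk)) _

-- A's whole fold = pvDmap of pvLast
theorem pvOuter (lst : List (List Int)) (d : PySem.Dict Int (List Int)) :
    lst.foldl (fun new i =>
      i.foldl (fun new k =>
        match PySem.List.index? i k with
        | some idx =>
          match PySem.List.pop? i (idx : Int) with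
          | some r => PySem.Dict.insert new k r.2
          | none => new
        | none => new) new) (pvDmap d)
    = pvDmap (lst.foldl (fun d i => i.foldl (fun d k => PySem.Dict.insert d k i) d) d) := by
  induction lst generalizing d with
  | nil => rfl
  | cons i t ih =>
    simp only [List.foldl_cons]
    rw [pvInner i i (fun _ h => h) d]
    exact ih _

-- keys of pvLast are distinct
theorem pvLast_nodup (lst : List (List Int)) (d : PySem.Dict Int (List Int))
    (hd : d.keys.Nodup) :
    (lst.foldl (fun d i => i.foldl (fun d k => PySem.Dict.insert d k i) d) d).keys.Nodup := by
  induction lst generalizing d with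
  | nil => exact hd
  | cons i t ih =>
    simp only [List.foldl_cons]
    exact ih _ (PySem.Dict.nodup_keys_foldl_insert i (fun _ _ => i) d hd)

-- B's first pass IS PySem.Set.update iterated, and it equals pvLast's key list
theorem pvOrder_eq_keys (lst : List (List Int)) (d : PySem.Dict Int (List Int)) :
    lst.foldl (fun ord i =>
      i.foldl (fun ord k => if ord.contains k then ord else ord ++ [k]) ord) d.keys
    = (lst.foldl (fun d i => i.foldl (fun d k => PySem.Dict.insert d k i) d) d).keys := by
  induction lst generalizing d with
  | nil => rfl
  | cons i t ih =>
    simp only [List.foldl_cons]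
    have h1 : i.foldl (fun ord k => if ord.contains k then ord else ord ++ [k]) d.keys
        = PySem.Set.update d.keys i := rfl
    have h2 : (i.foldl (fun d k => PySem.Dict.insert d k i) d).keys
        = PySem.Set.update d.keys i :=
      PySem.Dict.keys_foldl_insert i (fun _ _ => i) d
    rw [h1]
    have := ih (i.foldl (fun d k => PySem.Dict.insert d k i) d)
    rw [h2] at this
    exact this

-- get? of the inner insert fold
theorem pvInnerGet (i : List Int) (l : List Int) (d : PySem.Dict Int (List Int)) (k : Int) :
    (l.foldl (fun d k' => PySem.Dict.insert d k' i) d).get? k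
    = if l.contains k then some i else d.get? k := by
  induction l generalizing d with
  | nil => simp
  | cons x s ih =>
    simp only [List.foldl_cons, ih, PySem.Dict.get?_insert]
    by_cases hx : k = x
    · subst hx
      by_cases hs : s.contains k = true <;> simp
    · simp [hx]

-- get? of pvLast is the first hit of the backward scan
theorem pvGetLast (lst : List (List Int)) (d : PySem.Dict Int (List Int)) (k : Int) :
    (lst.foldl (fun d i => i.foldl (fun d k' => PySem.Dict.insert d k' i) d) d).get? k
    = ((lst.reverse).find? (fun i => i.contains k)).or (d.get? k) := by
  induction lst generalizing d with
  | nil => simp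
  | cons i t ih =>
    simp only [List.foldl_cons, List.reverse_cons, List.find?_append, ih, pvInnerGet,
      Option.or_assoc]
    by_cases h : k ∈ i <;> simp [h]

-- ===== VERDICT (by name: the statement is the Claim_ definition above) =====
theorem homonyms_spec : Claim_equal_homonyms := by
  intro lst _
  show homonyms lst = homonyms_alt lst
  have hnd : (pvLast lst).keys.Nodup :=
    pvLast_nodup lst PySem.Dict.empty List.nodup_nil
  -- A = keys of pvLast mapped through pvG with the stored list
  have hA : homonyms lst
      = (pvLast lst).keys.map (fun k => pvG (k, (pvLast lst).getD k [])) := by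
    show (lst.foldl _ (pvDmap PySem.Dict.empty)).items = _
    rw [pvOuter lst PySem.Dict.empty]
    show ((pvLast lst).items.map pvG) = _
    rw [PySem.Dict.items_eq_map_keys (pvLast lst) hnd [], List.map_map]
    simp [Function.comp_def]
  -- B's order list is exactly those keys
  have horder : lst.foldl (fun ord i =>
      i.foldl (fun ord k => if ord.contains k then ord else ord ++ [k]) ord) []
      = (pvLast lst).keys := pvOrder_eq_keys lst PySem.Dict.empty
  -- B's second-pass step, for k a key of pvLast, inserts pvEra k (the stored list)
  have hstep : ∀ (out : PySem.Dict Int (List Int)) (k : Int), k ∈ (pvLast lst).keys →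
      (match (lst.reverse).find? (fun i => i.contains k) with
       | some i =>
         match PySem.List.remove? i k with
         | some c => PySem.Dict.insert out k c
         | none => out
       | none => out)
      = out.insert k (pvEra k ((pvLast lst).getD k [])) := by
    intro out k hk
    have hc : (pvLast lst).contains k = true :=
      (PySem.Dict.contains_iff_mem_keys _ _).mpr hk
    have hg : ((pvLast lst).get? k).isSome := by
      rw [PySem.Dict.contains_eq_isSome_get?] at hc; exact hc
    obtain ⟨i, hi⟩ := Option.isSome_iff_exists.mp hg
    have hfind : (lst.reverse).find? (fun i => i.contains k) = some i := by
      have := pvGetLast lst PySem.Dict.empty k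
      simp only [PySem.Dict.get?_empty, Option.or_none] at this
      rw [← this]; exact hi
    have hmem : k ∈ i := by
      have := List.find?_some hfind
      simpa [List.contains_iff_mem] using this
    obtain ⟨idx, hidx⟩ :=
      Option.isSome_iff_exists.mp ((PySem.List.index?_isSome_iff i k).mpr hmem)
    have hrem : PySem.List.remove? i k = some (i.eraseIdx idx) := by
      simp [PySem.List.remove?, show List.idxOf? k i = some idx from hidx]
    have hgd : (pvLast lst).getD k [] = i := by
      simp [PySem.Dict.getD_eq_get?_getD, hi]
    simp only [hfind, hrem, hgd, pvEra, hidx]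
  -- assemble B
  have hB : homonyms_alt lst
      = (pvLast lst).keys.map (fun k => (k, pvEra k ((pvLast lst).getD k []))) := by
    show ((lst.foldl (fun ord i =>
        i.foldl (fun ord k => if ord.contains k then ord else ord ++ [k]) ord) []).foldl
        _ PySem.Dict.empty).items = _
    rw [horder]
    rw [PySem.List.foldl_congr_mem _ _ _ _ (fun out k hk => hstep out k hk)]
    rw [PySem.Dict.items_foldl_insert_fresh (pvLast lst).keys (fun k => k)
      (fun k => pvEra k ((pvLast lst).getD k [])) PySem.Dict.empty
      (fun a _ => rfl) (by simpa using hnd)]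
    simp [PySem.Dict.empty]
  rw [hA, hB]
  rfl
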